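-- pv_equiv track=rewrite | github.com/Indrajit-sarkar/Image-Recognition | Image Recognition/detectors/food_detector.py | _categorize_food
-- ===== SOURCE A (Python) =====
-- def _categorize_food(food_name: str) -> str:
--     """Categorize food into groups"""
--     categories = {
--         'fruit': ['banana', 'apple', 'orange'],
--         'vegetable': ['broccoli', 'carrot'],
--         'fast_food': ['hot dog', 'pizza', 'sandwich'],
--         'dessert': ['donut', 'cake'],
--         'beverage': ['bottle', 'wine glass', 'cup'],
--         'utensil': ['fork', 'knife', 'spoon', 'bowl']
--     }
--
--     for category, items in categories.items():
--         if food_name.lower() in items: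
--             return category
--
--     return 'other'
-- ===== SOURCE B (Python) =====
-- _FOOD_CATEGORY = {
--     'banana': 'fruit', 'apple': 'fruit', 'orange': 'fruit',
--     'broccoli': 'vegetable', 'carrot': 'vegetable',
--     'hot dog': 'fast_food', 'pizza': 'fast_food', 'sandwich': 'fast_food',
--     'donut': 'dessert', 'cake': 'dessert',
--     'bottle': 'beverage', 'wine glass': 'beverage', 'cup': 'beverage',
--     'fork': 'utensil', 'knife': 'utensil', 'spoon': 'utensil', 'bowl': 'utensil',
-- }
--
-- def _categorize_food(food_name: str) -> str:
--     """Categorize food into groups"""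
--     return _FOOD_CATEGORY.get(food_name.lower(), 'other')
-- ===== Notes on version B (the rewrite author's own statement) =====
-- stated objective: idiomatic
-- what changed: Replaces the per-call loop over categories with membership tests by one precomputed reverse dict (food -> category) and a single dict.get lookup; the category scan and branch disappear.
import Mathlib
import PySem

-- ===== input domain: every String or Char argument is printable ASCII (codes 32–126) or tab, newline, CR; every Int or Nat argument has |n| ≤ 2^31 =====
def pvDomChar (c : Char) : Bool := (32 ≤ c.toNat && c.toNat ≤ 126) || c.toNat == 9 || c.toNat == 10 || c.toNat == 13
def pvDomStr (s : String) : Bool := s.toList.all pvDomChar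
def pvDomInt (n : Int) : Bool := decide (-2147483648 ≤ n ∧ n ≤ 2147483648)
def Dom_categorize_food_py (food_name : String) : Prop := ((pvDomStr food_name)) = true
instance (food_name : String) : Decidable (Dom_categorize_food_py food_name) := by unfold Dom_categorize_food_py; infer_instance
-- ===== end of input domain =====

-- ===== PORT A =====
-- A scans the category lists in order and returns the first category whose list contains the lowered name.
def pvCatScan (s : String) : List (String × List String) → String
  | [] => "other"
  | (cat, items) :: rest => if s ∈ items then cat else pvCatScan s rest

def pvCategories : List (String × List String) :=
  [("fruit", ["banana", "apple", "orange"]),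
   ("vegetable", ["broccoli", "carrot"]),
   ("fast_food", ["hot dog", "pizza", "sandwich"]),
   ("dessert", ["donut", "cake"]),
   ("beverage", ["bottle", "wine glass", "cup"]),
   ("utensil", ["fork", "knife", "spoon", "bowl"])]

def categorize_food_py (food_name : String) : String :=
  pvCatScan (PySem.Str.lower food_name) pvCategories

-- ===== PORT B =====
-- B: one precomputed reverse dict food -> category, then a single .get lookup.
def pvFoodCategory : PySem.Dict String String :=
  PySem.Dict.ofList
    [("banana", "fruit"), ("apple", "fruit"), ("orange", "fruit"),
     ("broccoli", "vegetable"), ("carrot", "vegetable"),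
     ("hot dog", "fast_food"), ("pizza", "fast_food"), ("sandwich", "fast_food"),
     ("donut", "dessert"), ("cake", "dessert"),
     ("bottle", "beverage"), ("wine glass", "beverage"), ("cup", "beverage"),
     ("fork", "utensil"), ("knife", "utensil"), ("spoon", "utensil"), ("bowl", "utensil")]

def categorize_food_py_alt (food_name : String) : String :=
  pvFoodCategory.getD (PySem.Str.lower food_name) "other"

-- ===== PRECONDITION & SPEC =====
def Spec_categorize_food_py (food_name : String) (out : String) : Prop := out = categorize_food_py_alt food_name
instance (food_name : String) (out : String) : Decidable (Spec_categorize_food_py food_name out) := by unfold Spec_categorize_food_py; infer_instance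

-- ===== CLAIM (what is proved, stated in full; the proofs are below) =====
def Claim_equal_categorize_food_py : Prop := ∀ (food_name : String), Dom_categorize_food_py food_name → Spec_categorize_food_py food_name (categorize_food_py food_name)

-- ===== LEMMAS AND PROOFS =====

-- Looking up s in a block of reverse-dict pairs that all map to `cat` is the membership test of A's loop.
lemma pv_lookup_block (s cat d : String) (items : List String) (rest : List (String × String)) :
    (PySem.Dict.mk (items.map (fun x => (x, cat)) ++ rest)).getD s d
      = if s ∈ items then cat else (PySem.Dict.mk rest).getD s d := by
  induction items with
  | nil => simp
  | cons x xs ih =>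
    simp only [List.map_cons, List.cons_append, PySem.Dict.getD_eq_get?_getD,
      PySem.Dict.get?_mk_cons, List.mem_cons]
    by_cases hx : x = s
    · subst hx; simp
    · have : ¬ s = x := fun h => hx h.symm
      simp only [beq_iff_eq, hx, if_false, this, false_or]
      simpa [PySem.Dict.getD_eq_get?_getD] using ih

-- The reverse dict's keys are pairwise distinct, so ofList keeps the literal list as-is.
lemma pvFoodCategory_eq_mk :
    pvFoodCategory = PySem.Dict.mk
      [("banana", "fruit"), ("apple", "fruit"), ("orange", "fruit"),
       ("broccoli", "vegetable"), ("carrot", "vegetable"),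
       ("hot dog", "fast_food"), ("pizza", "fast_food"), ("sandwich", "fast_food"),
       ("donut", "dessert"), ("cake", "dessert"),
       ("bottle", "beverage"), ("wine glass", "beverage"), ("cup", "beverage"),
       ("fork", "utensil"), ("knife", "utensil"), ("spoon", "utensil"), ("bowl", "utensil")] := by
  decide

lemma pv_scan_eq_lookup (s : String) :
    pvCatScan s pvCategories = (pvFoodCategory).getD s "other" := by
  rw [pvFoodCategory_eq_mk]
  have h : PySem.Dict.mk
      [("banana", "fruit"), ("apple", "fruit"), ("orange", "fruit"),
       ("broccoli", "vegetable"), ("carrot", "vegetable"),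
       ("hot dog", "fast_food"), ("pizza", "fast_food"), ("sandwich", "fast_food"),
       ("donut", "dessert"), ("cake", "dessert"),
       ("bottle", "beverage"), ("wine glass", "beverage"), ("cup", "beverage"),
       ("fork", "utensil"), ("knife", "utensil"), ("spoon", "utensil"), ("bowl", "utensil")]
    = PySem.Dict.mk
      (["banana", "apple", "orange"].map (fun x => (x, "fruit"))
        ++ (["broccoli", "carrot"].map (fun x => (x, "vegetable"))
        ++ (["hot dog", "pizza", "sandwich"].map (fun x => (x, "fast_food"))
        ++ (["donut", "cake"].map (fun x => (x, "dessert"))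
        ++ (["bottle", "wine glass", "cup"].map (fun x => (x, "beverage"))
        ++ (["fork", "knife", "spoon", "bowl"].map (fun x => (x, "utensil"))
        ++ ([] : List (String × String)))))))) := rfl
  rw [h, pv_lookup_block, pv_lookup_block, pv_lookup_block, pv_lookup_block,
      pv_lookup_block, pv_lookup_block]
  simp [pvCatScan, pvCategories, PySem.Dict.getD_eq_get?_getD, PySem.Dict.get?]

-- ===== VERDICT (by name: the statement is the Claim_ definition above) =====
theorem categorize_food_py_spec : Claim_equal_categorize_food_py := by
  intro food_name _
  unfold Spec_categorize_food_py categorize_food_py categorize_food_py_alt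
  exact pv_scan_eq_lookup (PySem.Str.lower food_name)
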